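-- pv_equiv track=rewrite | github.com/ChouGS/Network-Analysis-QES | patient_data.py | one_one
-- ===== SOURCE A (Python) =====
-- def one_one(a, b):
--     '''
--         Check if paired elements in iterables a and b have a one-to-one mapping.
--         a and b are expected to have same length.
--     '''
--     if len(a) != len(b):
--         return False, False, None, None
--
--     # o2o_ab: whether each element in a can be mapped to exactly one element in b
--     # o2o_ba: whether each element in b can be mapped to exactly one element in a
--     o2o_ab, o2o_ba = (True, True)
--
--     # dict_ab: the exact mapping from elements in a to elements in b
--     dict_ab = {}
--     for i in range(len(a)):
--         if str(a[i]) in dict_ab.keys():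
--             if b[i] not in dict_ab[str(a[i])]:
--                 o2o_ab = False
--                 dict_ab[str(a[i])].append(b[i])
--         else:
--             dict_ab[str(a[i])] = [b[i]]
--
--     # dict_ba: the exact mapping from elements in b to elements in a
--     dict_ba = {}
--     for i in range(len(b)):
--         if str(b[i]) in dict_ba.keys():
--             if a[i] not in dict_ba[str(b[i])]:
--                 o2o_ba = False
--                 dict_ba[str(b[i])].append(a[i])
--         else:
--             dict_ba[str(b[i])] = [a[i]]
--
--     return o2o_ab, o2o_ba, dict_ab, dict_ba
-- ===== SOURCE B (Python) =====
-- def one_one(a, b):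
--     '''Two-phase: group all pairs first, then dedup each group and read the flags.'''
--     if len(a) != len(b):
--         return False, False, None, None
--
--     def build(keys, vals):
--         raw = {}
--         for k, v in zip(keys, vals):
--             raw.setdefault(str(k), []).append(v)
--         out = {}
--         for k, vs in raw.items():
--             distinct = []
--             for v in vs:
--                 if v not in distinct:
--                     distinct.append(v)
--             out[k] = distinct
--         return all(len(vs) == 1 for vs in out.values()), out
--
--     o2o_ab, dict_ab = build(a, b)
--     o2o_ba, dict_ba = build(b, a)
--     return o2o_ab, o2o_ba, dict_ab, dict_ba
-- ===== Notes on version B (the rewrite author's own statement) =====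
-- stated objective: alternative
-- what changed: A detects duplicates incrementally while building deduplicated mapping dicts in one interleaved loop per direction; B first groups ALL paired values per key with setdefault/append, then in a separate reshaping pass deduplicates each group in first-appearance order and reads the one-to-one flags as 'every group has exactly one distinct value'.
import Mathlib
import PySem

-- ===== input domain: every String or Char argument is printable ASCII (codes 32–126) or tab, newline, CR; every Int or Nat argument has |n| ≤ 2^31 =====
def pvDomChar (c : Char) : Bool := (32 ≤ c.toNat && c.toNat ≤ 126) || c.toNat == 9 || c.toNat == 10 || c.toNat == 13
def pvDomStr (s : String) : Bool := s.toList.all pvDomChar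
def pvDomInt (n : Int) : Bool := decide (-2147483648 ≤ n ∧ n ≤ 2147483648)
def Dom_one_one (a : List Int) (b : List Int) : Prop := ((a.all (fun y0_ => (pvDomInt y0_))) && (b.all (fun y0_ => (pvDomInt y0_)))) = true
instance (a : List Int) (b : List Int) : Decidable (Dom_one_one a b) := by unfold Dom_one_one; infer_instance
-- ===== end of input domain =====

-- B replaces A's interleaved detect-duplicates-while-deduplicating loops by a two-phase group-then-reshape pass; alternative decomposition, same cost.

-- ===== PORT A =====
-- one loop body of A (used for both directions: keys str(x[i]), values y[i]); indices from range(len x) are always in range, so pyGetD's default is never read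
def oneStep (x : List Int) (y : List Int) (p : Bool × PySem.Dict String (List Int)) (i : Int) :
    Bool × PySem.Dict String (List Int) :=
  let k := PySem.Int.toStr (PySem.List.pyGetD x i 0)
  let v := PySem.List.pyGetD y i 0
  if p.2.contains k then
    if v ∈ p.2.getD k [] then p
    else (false, p.2.modify k [] (fun ds => ds ++ [v]))
  else (p.1, p.2.insert k [v])

def one_one (a : List Int) (b : List Int) : Bool × Bool × (Option (List (String × List Int))) × (Option (List (String × List Int))) :=
  if a.length ≠ b.length then (false, false, none, none)
  else
    let r1 := (PySem.List.pyRange 0 (a.length : Int) 1).foldl (oneStep a b) (true, PySem.Dict.empty)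
    let r2 := (PySem.List.pyRange 0 (b.length : Int) 1).foldl (oneStep b a) (true, PySem.Dict.empty)
    (r1.1, r2.1, some r1.2.items, some r2.2.items)

-- ===== PORT B =====
-- B's hand-written first-appearance dedup loop
def pvDedupLoop (vs : List Int) : List Int :=
  vs.foldl (fun ds v => if v ∈ ds then ds else ds ++ [v]) []

def buildAlt (keys : List Int) (vals : List Int) : Bool × List (String × List Int) :=
  let raw := (keys.zip vals).foldl
      (fun d p => d.modify (PySem.Int.toStr p.1) [] (fun vs => vs ++ [p.2])) PySem.Dict.empty
  let out := raw.items.foldl (fun d p => d.insert p.1 (pvDedupLoop p.2)) PySem.Dict.empty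
  (out.values.all (fun vs => vs.length == 1), out.items)

def one_one_alt (a : List Int) (b : List Int) : Bool × Bool × (Option (List (String × List Int))) × (Option (List (String × List Int))) :=
  if a.length ≠ b.length then (false, false, none, none)
  else
    let r1 := buildAlt a b
    let r2 := buildAlt b a
    (r1.1, r2.1, some r1.2, some r2.2)

-- ===== PRECONDITION & SPEC =====
def Spec_one_one (a : List Int) (b : List Int) (out : Bool × Bool × (Option (List (String × List Int))) × (Option (List (String × List Int)))) : Prop := out = one_one_alt a b
instance (a : List Int) (b : List Int) (out : Bool × Bool × (Option (List (String × List Int))) × (Option (List (String × List Int)))) : Decidable (Spec_one_one a b out) := by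
  unfold Spec_one_one
  letI : DecidableEq (Option (List (String × List Int))) := fun a b => a.instDecidableEq b
  infer_instance

-- ===== CLAIM (what is proved, stated in full; the proofs are below) =====
def Claim_equal_one_one : Prop := ∀ (a : List Int) (b : List Int), Dom_one_one a b → Spec_one_one a b (one_one a b)

-- ===== LEMMAS AND PROOFS =====

-- A's loop body on an already-paired (str key, value) element
def pvStepA (p : Bool × PySem.Dict String (List Int)) (kv : String × Int) :
    Bool × PySem.Dict String (List Int) :=
  if p.2.contains kv.1 then
    if kv.2 ∈ p.2.getD kv.1 [] then p
    else (false, p.2.modify kv.1 [] (fun ds => ds ++ [kv.2]))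
  else (p.1, p.2.insert kv.1 [kv.2])

-- the dict component of A's loop, in isolation
def pvStepD (d : PySem.Dict String (List Int)) (kv : String × Int) : PySem.Dict String (List Int) :=
  d.modify kv.1 [] (fun ds => if kv.2 ∈ ds then ds else ds ++ [kv.2])

-- B's grouping step
def pvStepR (d : PySem.Dict String (List Int)) (kv : String × Int) : PySem.Dict String (List Int) :=
  d.modify kv.1 [] (fun ds => ds ++ [kv.2])

-- A's index loop is pvStepA folded over the zipped (str key, value) pairs
theorem pv_bridge (x y : List Int) (h : x.length = y.length) (st : Bool × PySem.Dict String (List Int)) :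
    (PySem.List.pyRange 0 (x.length : Int) 1).foldl (oneStep x y) st
      = ((x.zip y).map (fun p => (PySem.Int.toStr p.1, p.2))).foldl pvStepA st := by
  rw [List.foldl_map]
  have hz : (x.zip y).length = x.length := by simp [h]
  have hcg : (PySem.List.pyRange 0 (x.length : Int) 1).foldl (oneStep x y) st
      = (PySem.List.pyRange 0 (x.length : Int) 1).foldl
          (fun acc j => (fun acc (p : Int × Int) => pvStepA acc (PySem.Int.toStr p.1, p.2)) acc
            (PySem.List.pyGetD (x.zip y) j (0, 0))) st := by
    apply PySem.List.foldl_congr_mem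
    intro acc j hj
    rw [PySem.List.mem_pyRange_one] at hj
    have hj1 : j < ((x.zip y).length : Int) := by rw [hz]; exact hj.2
    have hj2 : j < ((y.length : Int)) := by rw [← h]; exact hj.2
    have e1 := PySem.List.pyGetD_eq_getElem x (0 : Int) hj.1 hj.2
    have e2 := PySem.List.pyGetD_eq_getElem y (0 : Int) hj.1 hj2
    have e3 := PySem.List.pyGetD_eq_getElem (x.zip y) ((0 : Int), (0 : Int)) hj.1 hj1
    simp only [oneStep, pvStepA, e1, e2, e3, List.getElem_zip]
  rw [hcg, show ((x.length : Int)) = ((x.zip y).length : Int) by rw [hz]]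
  simpa using PySem.List.foldl_pyRange_pyGetD' (x.zip y) ((0 : Int), (0 : Int))
    (fun acc (p : Int × Int) => pvStepA acc (PySem.Int.toStr p.1, p.2)) st (le_refl 0)

-- a modify that rewrites a present entry to its own value is the identity
theorem pv_modify_self (d : PySem.Dict String (List Int)) (k : String)
    (f : List Int → List Int) (hnd : d.keys.Nodup) (hc : d.contains k = true)
    (hf : f (d.getD k []) = d.getD k []) : d.modify k [] f = d := by
  apply PySem.Dict.ext
  show (d.insert k (f (d.getD k []))).items = d.items
  rw [hf, PySem.Dict.items_insert_of_contains d _ hc]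
  have : ∀ p ∈ d.items, (if (p.1 == k) = true then (k, d.getD k []) else p) = p := by
    intro p hp
    by_cases hk : p.1 = k
    · have h2 : d.getD k [] = p.2 := by
        subst hk; exact PySem.Dict.getD_of_mem_items d hp hnd []
      simp [hk, h2, Prod.ext_iff]
    · simp [hk]
  rw [List.map_congr_left this, List.map_id']

-- group lengths only grow under the dedup-insert loop
theorem pv_lenMono (l : List (String × Int)) (d : PySem.Dict String (List Int)) (k : String) :
    (d.getD k []).length ≤ ((l.foldl pvStepD d).getD k []).length := by
  induction l generalizing d with
  | nil => simp
  | cons kv t ih =>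
    refine le_trans ?_ (ih (pvStepD d kv))
    show (d.getD k []).length ≤ ((d.modify kv.1 [] _).getD k []).length
    rw [PySem.Dict.getD_modify]
    split_ifs with h1 h2
    · subst h1; exact Nat.le_refl _
    · subst h1; simp
    · exact Nat.le_refl _

theorem pv_nodup_stepD (d : PySem.Dict String (List Int)) (kv : String × Int)
    (hnd : d.keys.Nodup) : (pvStepD d kv).keys.Nodup := by
  have := PySem.Dict.nodup_keys_foldl_modify_key [kv] (fun kv => kv.1) []
    (fun _ kv => fun ds => if kv.2 ∈ ds then ds else ds ++ [kv.2]) d hnd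
  simpa [pvStepD] using this

theorem pv_nodup_foldD (l : List (String × Int)) (d : PySem.Dict String (List Int))
    (hnd : d.keys.Nodup) : (l.foldl pvStepD d).keys.Nodup := by
  have := PySem.Dict.nodup_keys_foldl_modify_key l (fun kv => kv.1) []
    (fun _ kv => fun ds => if kv.2 ∈ ds then ds else ds ++ [kv.2]) d hnd
  simpa [pvStepD] using this

theorem pv_keys_foldD (l : List (String × Int)) (d : PySem.Dict String (List Int)) :
    (l.foldl pvStepD d).keys = PySem.Set.update d.keys (l.map (fun kv => kv.1)) := by
  have := PySem.Dict.keys_foldl_modify_key l (fun kv => kv.1) []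
    (fun _ kv => fun ds => if kv.2 ∈ ds then ds else ds ++ [kv.2]) d
  simpa [pvStepD] using this

theorem pv_ne_stepD (d : PySem.Dict String (List Int)) (kv : String × Int)
    (hne : ∀ p ∈ d.items, p.2 ≠ ([] : List Int)) :
    ∀ p ∈ (pvStepD d kv).items, p.2 ≠ ([] : List Int) := by
  intro p hp
  have : p ∈ (d.insert kv.1 (if kv.2 ∈ d.getD kv.1 [] then d.getD kv.1 [] else d.getD kv.1 [] ++ [kv.2])).items := hp
  rw [PySem.Dict.mem_items_insert] at this
  rcases this with h | h
  · subst h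
    split_ifs with hm
    · intro hnil; simp_all
    · simp
  · exact hne p h.1

-- A's loop: the dict is the dedup-insert fold, the flag says every final group kept its size (== 1 from an empty start)
theorem pv_loopA (l : List (String × Int)) (flag : Bool) (d : PySem.Dict String (List Int))
    (hnd : d.keys.Nodup) (hne : ∀ p ∈ d.items, p.2 ≠ ([] : List Int)) :
    l.foldl pvStepA (flag, d)
      = (flag && (l.foldl pvStepD d).items.all (fun p => p.2.length == max 1 (d.getD p.1 []).length),
         l.foldl pvStepD d) := by
  induction l generalizing flag d with
  | nil =>
    simp only [List.foldl_nil]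
    have : d.items.all (fun p => p.2.length == max 1 (d.getD p.1 []).length) = true := by
      rw [List.all_eq_true]
      intro p hp
      have h1 : d.getD p.1 [] = p.2 := by
        obtain ⟨k0, v0⟩ := p
        exact PySem.Dict.getD_of_mem_items d hp hnd []
      have h2 : p.2 ≠ [] := hne p hp
      have : 1 ≤ p.2.length := by
        cases hpl : p.2 with
        | nil => exact absurd hpl h2
        | cons a t => simp
      simp [h1, Nat.max_eq_right this]
    simp [this]
  | cons kv t ih =>
    obtain ⟨k, v⟩ := kv
    by_cases hc : d.contains k = true
    · by_cases hm : v ∈ d.getD k []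
      · have hA : pvStepA (flag, d) (k, v) = (flag, d) := by simp [pvStepA, hc, hm]
        have hD : pvStepD d (k, v) = d :=
          pv_modify_self d k _ hnd hc (by simp [hm])
        simp only [List.foldl_cons, hA, hD, ih flag d hnd hne]
      · have hA : pvStepA (flag, d) (k, v)
            = (false, d.modify k [] (fun ds => ds ++ [v])) := by simp [pvStepA, hc, hm]
        have hD : pvStepD d (k, v) = d.modify k [] (fun ds => ds ++ [v]) := by
          simp [pvStepD, PySem.Dict.modify, hm]
        set d' := d.modify k [] (fun ds => ds ++ [v]) with hd'
        have hnd' : d'.keys.Nodup := by rw [← hD]; exact pv_nodup_stepD d (k, v) hnd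
        have hne' : ∀ p ∈ d'.items, p.2 ≠ ([] : List Int) := by
          rw [← hD]; exact pv_ne_stepD d (k, v) hne
        have hall : (t.foldl pvStepD d').items.all
            (fun p => p.2.length == max 1 (d.getD p.1 []).length) = false := by
          -- the k entry violates it: it grew past its (nonempty) old size
          have hkmem : k ∈ (t.foldl pvStepD d').keys := by
            rw [pv_keys_foldD]
            have : k ∈ d'.keys := by
              rw [← PySem.Dict.contains_iff_mem_keys]
              simp [hd', PySem.Dict.contains_modify]
            exact (PySem.Set.mem_update _ _ _).mpr (Or.inl this)
          have hnodF : (t.foldl pvStepD d').keys.Nodup := pv_nodup_foldD t d' hnd'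
          have hgd' : d'.getD k [] = d.getD k [] ++ [v] := by
            rw [hd', PySem.Dict.getD_modify]; simp
          have hglen : (d.getD k []).length + 1 ≤ ((t.foldl pvStepD d').getD k []).length := by
            have := pv_lenMono t d' k
            rw [hgd'] at this; simpa using this
          have hg1 : 1 ≤ (d.getD k []).length := by
            have hk0 : k ∈ d.keys := (PySem.Dict.contains_iff_mem_keys d k).mp hc
            have : (k, d.getD k []) ∈ d.items := by
              rw [PySem.Dict.items_eq_map_keys d hnd []]
              exact List.mem_map.mpr ⟨k, hk0, rfl⟩
            have hnil := hne _ this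
            cases hgl : d.getD k [] with
            | nil => exact absurd hgl hnil
            | cons a s => simp
          rw [List.all_eq_false]
          refine ⟨(k, (t.foldl pvStepD d').getD k []), ?_, ?_⟩
          · rw [PySem.Dict.items_eq_map_keys _ hnodF []]
            exact List.mem_map.mpr ⟨k, hkmem, rfl⟩
          · simp only [Nat.max_eq_right hg1]
            simp only [beq_iff_eq]
            omega
        simp only [List.foldl_cons, hA, hD, ih false d' hnd' hne', hall]
        simp
    · have hc' : d.contains k = false := by simpa using hc
      have hA : pvStepA (flag, d) (k, v) = (flag, d.insert k [v]) := by simp [pvStepA, hc]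
      have hD : pvStepD d (k, v) = d.insert k [v] := by
        simp [pvStepD, PySem.Dict.modify, PySem.Dict.getD_of_not_contains d _ hc']
      have hnd' : (d.insert k [v]).keys.Nodup := by rw [← hD]; exact pv_nodup_stepD d (k, v) hnd
      have hne' : ∀ p ∈ (d.insert k [v]).items, p.2 ≠ ([] : List Int) := by
        rw [← hD]; exact pv_ne_stepD d (k, v) hne
      have hfun : (fun (p : String × List Int) => p.2.length == max 1 ((d.insert k [v]).getD p.1 []).length)
          = (fun p => p.2.length == max 1 (d.getD p.1 []).length) := by
        funext p
        rw [PySem.Dict.getD_insert]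
        by_cases hpk : p.1 = k
        · rw [if_pos hpk, hpk, PySem.Dict.getD_of_not_contains d _ hc']
          simp
        · rw [if_neg hpk]
      simp only [List.foldl_cons, hA, hD, ih flag (d.insert k [v]) hnd' hne', hfun]

-- A's dedup-insert fold is B's group-everything fold with each group deduplicated
theorem pv_loopR (l : List (String × Int)) (d raw : PySem.Dict String (List Int))
    (hnd : raw.keys.Nodup)
    (hrel : d.items = raw.items.map (fun p => (p.1, pvDedupLoop p.2))) :
    (l.foldl pvStepD d).items
      = (l.foldl pvStepR raw).items.map (fun p => (p.1, pvDedupLoop p.2)) := by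
  induction l generalizing d raw with
  | nil => simpa using hrel
  | cons kv t ih =>
    obtain ⟨k, v⟩ := kv
    have hkeys : d.keys = raw.keys := by
      simp only [PySem.Dict.keys, hrel, List.map_map]
      rfl
    have hndd : d.keys.Nodup := by rw [hkeys]; exact hnd
    have hcd : ∀ k', d.contains k' = raw.contains k' := by
      intro k'
      rw [PySem.Dict.contains_eq_decide_mem_keys, PySem.Dict.contains_eq_decide_mem_keys, hkeys]
    have hgd : d.getD k [] = pvDedupLoop (raw.getD k []) := by
      by_cases hck : raw.contains k = true
      · have hmem : (k, raw.getD k []) ∈ raw.items := by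
          rw [PySem.Dict.items_eq_map_keys raw hnd []]
          exact List.mem_map.mpr ⟨k, (PySem.Dict.contains_iff_mem_keys raw k).mp hck, rfl⟩
        have hmd : (k, pvDedupLoop (raw.getD k [])) ∈ d.items := by
          rw [hrel]
          exact List.mem_map.mpr ⟨(k, raw.getD k []), hmem, rfl⟩
        exact PySem.Dict.getD_of_mem_items d hmd hndd []
      · have hck' : raw.contains k = false := by simpa using hck
        rw [PySem.Dict.getD_of_not_contains raw _ hck',
            PySem.Dict.getD_of_not_contains d _ (by rw [hcd]; exact hck')]
        rfl
    have hded : (if v ∈ d.getD k [] then d.getD k [] else d.getD k [] ++ [v])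
        = pvDedupLoop (raw.getD k [] ++ [v]) := by
      rw [hgd]
      simp [pvDedupLoop, List.foldl_append]
    have hstep : (pvStepD d (k, v)).items
        = (pvStepR raw (k, v)).items.map (fun p => (p.1, pvDedupLoop p.2)) := by
      show (d.insert k _).items = ((raw.insert k _).items).map _
      by_cases hck : raw.contains k = true
      · rw [PySem.Dict.items_insert_of_contains d _ (by rw [hcd]; exact hck),
            PySem.Dict.items_insert_of_contains raw _ hck, hrel, List.map_map, List.map_map]
        apply List.map_congr_left
        intro p hp
        by_cases hpk : p.1 = k
        · simp only [Function.comp, hpk, beq_self_eq_true, if_true]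
          rw [hded]
        · simp [Function.comp, hpk]
      · have hck' : raw.contains k = false := by simpa using hck
        rw [PySem.Dict.items_insert_of_not_contains d _ (by rw [hcd]; exact hck'),
            PySem.Dict.items_insert_of_not_contains raw _ hck', hrel, List.map_append]
        congr 1
        simp only [List.map_cons, List.map_nil]
        rw [PySem.Dict.getD_of_not_contains d _ (by rw [hcd]; exact hck'),
            PySem.Dict.getD_of_not_contains raw _ hck']
        simp [pvDedupLoop]
    have hnd' : (pvStepR raw (k, v)).keys.Nodup := by
      have := PySem.Dict.nodup_keys_foldl_modify_key [(k, v)] (fun kv => kv.1) []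
        (fun _ kv => fun ds => ds ++ [kv.2]) raw hnd
      simpa [pvStepR] using this
    simpa only [List.foldl_cons] using ih (pvStepD d (k, v)) (pvStepR raw (k, v)) hnd' hstep

-- one direction of the result (flag and items) agrees between the two ports
theorem pv_dir (x y : List Int) (h : x.length = y.length) :
    ((PySem.List.pyRange 0 (x.length : Int) 1).foldl (oneStep x y) (true, PySem.Dict.empty)).1
        = (buildAlt x y).1
      ∧ ((PySem.List.pyRange 0 (x.length : Int) 1).foldl (oneStep x y) (true, PySem.Dict.empty)).2.items
        = (buildAlt x y).2 := by
  set l := (x.zip y).map (fun p => (PySem.Int.toStr p.1, p.2)) with hl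
  set raw := (x.zip y).foldl
      (fun d p => d.modify (PySem.Int.toStr p.1) [] (fun vs => vs ++ [p.2])) PySem.Dict.empty with hraw
  have hraw2 : l.foldl pvStepR PySem.Dict.empty = raw := by
    rw [hl, List.foldl_map]
    rfl
  have hndraw : raw.keys.Nodup := by
    rw [← hraw2]
    have := PySem.Dict.nodup_keys_foldl_modify_key l (fun kv => kv.1) []
      (fun _ kv => fun ds => ds ++ [kv.2]) PySem.Dict.empty (by simp)
    simpa [pvStepR] using this
  set out := raw.items.foldl (fun d p => d.insert p.1 (pvDedupLoop p.2)) PySem.Dict.empty with hout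
  have houti : out.items = raw.items.map (fun p => (p.1, pvDedupLoop p.2)) := by
    rw [hout]
    have := PySem.Dict.items_foldl_insert_fresh raw.items (fun p => p.1)
      (fun p => pvDedupLoop p.2) PySem.Dict.empty (by intro p _; simp)
      (by simpa [PySem.Dict.keys] using hndraw)
    simpa using this
  have hF : (l.foldl pvStepD PySem.Dict.empty).items = out.items := by
    rw [houti, ← hraw2]
    exact pv_loopR l PySem.Dict.empty PySem.Dict.empty (by simp) rfl
  have hA := pv_loopA l true PySem.Dict.empty (by simp)
    (by intro p hp; simp [PySem.Dict.empty] at hp)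
  rw [pv_bridge x y h, hA]
  constructor
  · simp only [Bool.true_and, hF]
    show out.items.all (fun p => p.2.length == max 1 ((PySem.Dict.empty : PySem.Dict String (List Int)).getD p.1 []).length)
        = out.values.all (fun vs => vs.length == 1)
    simp [PySem.Dict.values, List.all_map]
    rfl
  · exact hF

-- ===== VERDICT (by name: the statement is the Claim_ definition above) =====
theorem one_one_spec : Claim_equal_one_one := by
  intro a b _
  unfold Spec_one_one one_one one_one_alt
  by_cases hlen : a.length = b.length
  · have h1 := pv_dir a b hlen
    have h2 := pv_dir b a hlen.symm
    rw [if_neg (fun hc => hc hlen), if_neg (fun hc => hc hlen)]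
    exact Prod.ext h1.1 (Prod.ext h2.1 (by simp [h1.2, h2.2]))
  · simp [hlen]
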